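-- pv_equiv track=rewrite | github.com/j-kumor/PodstawyProgramowania | Functions/7-12.py | asterisks
-- ===== SOURCE A (Python) =====
-- def asterisks(n):
--     text = ''
--     for i in range(1, n + 1):
--         if i == 1:
--             text += '*'
--         else:
--             text += '/*'
--     return text
-- ===== SOURCE B (Python) =====
-- def asterisks(n):
--     return '' if n < 1 else '*' + '/*' * (n - 1)
-- ===== Notes on version B (the rewrite author's own statement) =====
-- stated objective: simpler
-- what changed: Replaced the character-by-character accumulation loop with the closed-form string expression '*' + '/*' * (n-1).
import Mathlib
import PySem

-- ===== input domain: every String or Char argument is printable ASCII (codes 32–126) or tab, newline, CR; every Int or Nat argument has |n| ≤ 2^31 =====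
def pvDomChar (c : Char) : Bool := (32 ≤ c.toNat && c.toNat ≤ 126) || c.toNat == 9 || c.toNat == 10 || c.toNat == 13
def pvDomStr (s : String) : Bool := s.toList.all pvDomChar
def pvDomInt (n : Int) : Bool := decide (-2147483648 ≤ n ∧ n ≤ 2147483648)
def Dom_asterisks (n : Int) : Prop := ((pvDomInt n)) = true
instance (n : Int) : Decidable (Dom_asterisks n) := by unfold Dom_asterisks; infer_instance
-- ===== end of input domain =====

-- B replaces A's accumulation loop with the closed-form expression '*' + '/*' * (n-1) (simpler).

-- ===== PORT A =====
def asterisks (n : Int) : String :=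
  (PySem.List.pyRange 1 (n + 1) 1).foldl
    (fun text i => if i == 1 then text ++ "*" else text ++ "/*") ""

-- ===== PORT B =====
def asterisks_alt (n : Int) : String :=
  if n < 1 then "" else "*" ++ String.join (List.replicate (n - 1).toNat "/*")

-- ===== PRECONDITION & SPEC =====
def Spec_asterisks (n : Int) (out : String) : Prop := out = asterisks_alt n
instance (n : Int) (out : String) : Decidable (Spec_asterisks n out) := by unfold Spec_asterisks; infer_instance

-- ===== CLAIM (what is proved, stated in full; the proofs are below) =====
def Claim_equal_asterisks : Prop := ∀ (n : Int), Dom_asterisks n → Spec_asterisks n (asterisks n)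

-- ===== LEMMAS AND PROOFS =====

theorem asterisks_loop (k : Nat) :
    (PySem.List.pyRange 1 ((k : Int) + 1) 1).foldl
      (fun text i => if i == 1 then text ++ "*" else text ++ "/*") "" =
    (if k = 0 then "" else "*" ++ String.join (List.replicate (k - 1) "/*")) := by
  induction k with
  | zero => simp [PySem.List.pyRange_one_eq_nil]
  | succ k ih =>
    have h : ((k : Int) + 1) + 1 = ((k + 1 : Nat) : Int) + 1 := by push_cast; ring
    rw [← h, PySem.List.pyRange_one_succ_right (by omega), List.foldl_append, ih]
    cases k with
    | zero => simp [String.join]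
    | succ j =>
      have h0 : ((j : Int) + 1) ≠ 0 := by omega
      simp [h0, String.join, List.replicate_succ', List.foldl_append, String.append_assoc]

theorem asterisks_spec : Claim_equal_asterisks := by
  intro n _
  unfold Spec_asterisks asterisks asterisks_alt
  by_cases h : n < 1
  · rw [PySem.List.pyRange_one_eq_nil (by omega)]
    simp [h]
  · have h1 : (1 : Int) ≤ n := by omega
    have hk : n = ((n.toNat : Int)) := by omega
    rw [hk, asterisks_loop]
    have hk0 : n.toNat ≠ 0 := by omega
    have hlt : ¬ ((n.toNat : Int) < 1) := by omega
    rw [if_neg hk0, if_neg hlt]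
    have he : n.toNat - 1 = ((n.toNat : Int) - 1).toNat := by omega
    rw [he]
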